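-- pv_equiv track=rewrite | github.com/mikowhychuck/NLP | porter.py | measure_of_word
-- ===== SOURCE A (Python) =====
-- vovels = ['a', 'e', 'i', 'o', 'u']
--
-- def measure_of_word(word):
--     sequence = ''
--     for char in word:
--         if char in vovels:
--             sequence += 'V'
--         else:
--             sequence += 'C'
--     sequence = ''.join([sequence[i] for i in range(len(sequence)) if i == 0 or sequence[i] != sequence[i-1]])
--     return sequence.count('VC')
-- ===== SOURCE B (Python) =====
-- vovels = ['a', 'e', 'i', 'o', 'u']
--
-- def measure_of_word(word):
--     # single pass state machine: count vowel->consonant transitions directly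
--     count = 0
--     prev_vowel = False
--     for char in word:
--         is_vowel = char in vovels
--         if prev_vowel and not is_vowel:
--             count += 1
--         prev_vowel = is_vowel
--     return count
-- ===== Notes on version B (the rewrite author's own statement) =====
-- stated objective: faster
-- what changed: Replaces the build-marker-string, collapse-duplicates comprehension and substring-count pipeline by a single pass over the word that keeps one boolean (was the previous char a vowel) and increments a counter on each vowel-to-consonant transition.
import Mathlib
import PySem

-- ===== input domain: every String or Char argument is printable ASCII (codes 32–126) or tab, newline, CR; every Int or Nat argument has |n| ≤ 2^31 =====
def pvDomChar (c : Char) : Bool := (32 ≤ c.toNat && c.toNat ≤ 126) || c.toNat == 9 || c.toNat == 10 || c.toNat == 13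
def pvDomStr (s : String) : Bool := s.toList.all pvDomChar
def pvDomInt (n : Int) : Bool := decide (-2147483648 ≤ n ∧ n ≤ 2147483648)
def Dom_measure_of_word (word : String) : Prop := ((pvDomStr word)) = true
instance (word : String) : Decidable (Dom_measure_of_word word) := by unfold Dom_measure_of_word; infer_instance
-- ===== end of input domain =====

-- B replaces A's build-V/C-string → collapse-runs → count 'VC' pipeline by one pass that
-- counts vowel→consonant transitions with a single boolean of state (objective: simpler).

-- ===== PORT A =====
def vovels : List Char := ['a', 'e', 'i', 'o', 'u']

def measure_of_word (word : String) : Int :=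
  -- sequence = '' ; for char in word: sequence += 'V' / 'C'
  let sequence : List Char :=
    word.toList.foldl (fun s c => s ++ [if vovels.contains c then 'V' else 'C']) []
  -- sequence = ''.join([sequence[i] for i in range(len(sequence)) if i == 0 or sequence[i] != sequence[i-1]])
  let sequence2 : List Char :=
    (PySem.List.pyRange 0 sequence.length 1).foldl
      (fun acc i =>
        if i == 0 || PySem.List.pyGet? sequence i != PySem.List.pyGet? sequence (i - 1)
        then acc ++ [(PySem.List.pyGet? sequence i).getD 'C']  -- i is always in range here
        else acc) []
  -- return sequence.count('VC')
  (PySem.Chars.count sequence2 ['V', 'C'] : Int)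

-- ===== PORT B =====
def measure_of_word_alt (word : String) : Int :=
  (word.toList.foldl
    (fun (st : Int × Bool) char =>
      let is_vowel := vovels.contains char
      (if st.2 && !is_vowel then st.1 + 1 else st.1, is_vowel))
    (0, false)).1

-- ===== PRECONDITION & SPEC =====
def Spec_measure_of_word (word : String) (out : Int) : Prop := out = measure_of_word_alt word
instance (word : String) (out : Int) : Decidable (Spec_measure_of_word word out) := by unfold Spec_measure_of_word; infer_instance

-- ===== CLAIM (what is proved, stated in full; the proofs are below) =====
def Claim_equal_measure_of_word : Prop := ∀ (word : String), Dom_measure_of_word word → Spec_measure_of_word word (measure_of_word word)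

-- ===== LEMMAS AND PROOFS =====

-- helper: the V/C marking of one char
def vcOf (c : Char) : Char := if vovels.contains c then 'V' else 'C'

-- helper: collapse of consecutive duplicates (first kept)
def colAux : Char → List Char → List Char
  | _, [] => []
  | p, b :: l => if b ≠ p then b :: colAux b l else colAux p l

def collapse : List Char → List Char
  | [] => []
  | a :: l => a :: colAux a l

-- helper: structural non-overlapping count of the pattern "VC"
def vcCount : List Char → Nat
  | [] => 0
  | h :: t =>
    if ['V', 'C'].isPrefixOf (h :: t) then vcCount ((h :: t).drop 2) + 1 else vcCount t
termination_by l => l.length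
decreasing_by simp; cases t <;> simp <;> omega

theorem colAux_append (t : List Char) : ∀ (p c : Char),
    colAux p (t ++ [c]) = colAux p t ++ (if t.getLastD p = c then [] else [c]) := by
  induction t with
  | nil => intro p c; by_cases h : c = p <;> simp [colAux, h] <;> tauto
  | cons b l ih =>
    intro p c
    by_cases h : b = p <;>
      simp only [List.cons_append, colAux, h, ih, if_neg, if_pos, List.getLastD_cons,
        ne_eq, not_true_eq_false, not_false_eq_true, ite_false, ite_true] <;>
      simp [List.getLastD_cons]

theorem collapse_append (t : List Char) (c : Char) :
    collapse (t ++ [c]) = collapse t ++ (if t.getLast? = some c then [] else [c]) := by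
  cases t with
  | nil => simp [collapse, colAux]
  | cons a l =>
    simp only [List.cons_append, collapse, colAux_append l a c, List.getLast?_cons,
      Option.some.injEq]
    by_cases h : l.getLastD a = c <;> simp [h]

theorem getLast?_collapse (t : List Char) : (collapse t).getLast? = t.getLast? := by
  induction t using List.reverseRecOn with
  | nil => rfl
  | append_singleton l c ih =>
    rw [collapse_append]
    by_cases h : l.getLast? = some c
    · simpa [h] using ih.trans h
    · simp [h]

theorem count_go_eq (fuel : Nat) : ∀ (s : List Char) (acc : Nat), s.length ≤ fuel →
    PySem.Chars.count.go ['V', 'C'] fuel s acc = acc + vcCount s := by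
  induction fuel with
  | zero =>
    intro s acc h
    have : s = [] := by cases s <;> simp_all
    subst this; simp [PySem.Chars.count.go, vcCount]
  | succ n ih =>
    intro s acc h
    cases s with
    | nil => simp [PySem.Chars.count.go, vcCount]
    | cons a t =>
      rw [PySem.Chars.count.go]
      by_cases hp : List.isPrefixOf ['V', 'C'] (a :: t) = true
      · cases t with
        | nil => simp [List.isPrefixOf] at hp
        | cons b u =>
          rw [if_pos hp]
          simp only [List.length_cons, List.length_nil, List.drop_succ_cons, List.drop_zero]
          rw [ih u (acc + 1) (by simp at h; omega), vcCount, if_pos hp]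
          simp only [List.drop_succ_cons, List.drop_zero]
          omega
      · rw [if_neg hp, ih t acc (by simp at h; omega), vcCount, if_neg hp]
  termination_by fuel

theorem count_eq_vcCount (s : List Char) : PySem.Chars.count s ['V', 'C'] = vcCount s := by
  rw [PySem.Chars.count]
  simp only [List.isEmpty_cons, if_neg]
  rw [count_go_eq s.length s 0 le_rfl]
  simp

theorem vcCount_append_singleton : ∀ (s : List Char) (x : Char),
    vcCount (s ++ [x]) =
      vcCount s + (if s.getLast? = some 'V' ∧ x = 'C' then 1 else 0)
  | [], x => by simp [vcCount, List.isPrefixOf]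
  | [a], x => by
    by_cases h1 : a = 'V' <;> by_cases h2 : x = 'C' <;>
      simp [vcCount, List.isPrefixOf, h1, h2] <;> tauto
  | a :: b :: t, x => by
    by_cases hp : List.isPrefixOf ['V', 'C'] (a :: b :: t) = true
    · have hp' : List.isPrefixOf ['V', 'C'] (a :: b :: (t ++ [x])) = true := by
        simp [List.isPrefixOf] at hp ⊢; tauto
      rw [show (a :: b :: t) ++ [x] = a :: b :: (t ++ [x]) by simp,
          vcCount, if_pos hp']
      simp only [List.drop_succ_cons, List.drop_zero]
      rw [vcCount_append_singleton t x, vcCount, if_pos hp]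
      simp only [List.drop_succ_cons, List.drop_zero]
      cases t with
      | nil =>
        have hb : b = 'C' := by simp [List.isPrefixOf] at hp; tauto
        simp [hb]
      | cons c u =>
        rw [List.getLast?_cons_cons, List.getLast?_cons_cons]
        omega
    · have hp' : ¬ List.isPrefixOf ['V', 'C'] (a :: (b :: t ++ [x])) = true := by
        simp [List.isPrefixOf] at hp ⊢; tauto
      rw [show (a :: b :: t) ++ [x] = a :: (b :: t ++ [x]) by simp,
          vcCount, if_neg hp']
      rw [vcCount_append_singleton (b :: t) x, List.getLast?_cons_cons]
      conv_rhs => rw [vcCount, if_neg hp]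
  termination_by s _ => s.length

-- the index-loop comprehension computes collapse
theorem pyfold_eq_collapse (m : List Char) :
    (PySem.List.pyRange 0 m.length 1).foldl
      (fun acc i =>
        if i == 0 || PySem.List.pyGet? m i != PySem.List.pyGet? m (i - 1)
        then acc ++ [(PySem.List.pyGet? m i).getD 'C']
        else acc) [] = collapse m := by
  rw [PySem.List.foldl_append_if]
  simp only [List.nil_append]
  induction m using List.reverseRecOn with
  | nil => simp [collapse, PySem.List.pyRange]
  | append_singleton t c ih =>
    rw [show ((t ++ [c]).length : Int) = (t.length : Int) + 1 by simp,
        PySem.List.pyRange_one_succ_right (by positivity),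
        List.filter_append, List.map_append, collapse_append]
    have hfil : ∀ i ∈ PySem.List.pyRange 0 (t.length : Int) 1,
        (i == 0 || PySem.List.pyGet? (t ++ [c]) i != PySem.List.pyGet? (t ++ [c]) (i - 1))
        = (i == 0 || PySem.List.pyGet? t i != PySem.List.pyGet? t (i - 1)) := by
      intro i hi
      rw [PySem.List.mem_pyRange_one] at hi
      obtain ⟨k, rfl⟩ : ∃ k : Nat, i = (k : Int) := ⟨i.toNat, by omega⟩
      cases k with
      | zero => simp
      | succ j =>
        have hj : j + 1 < t.length := by exact_mod_cast hi.2
        have h1 : ((j + 1 : Nat) : Int) - 1 = (j : Int) := by push_cast; ring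
        rw [h1]
        simp only [PySem.List.pyGet?_natCast]
        rw [List.getElem?_append_left (by omega), List.getElem?_append_left (by omega)]
    have hmap : ∀ i ∈ List.filter
        (fun i => i == 0 || PySem.List.pyGet? t i != PySem.List.pyGet? t (i - 1))
        (PySem.List.pyRange 0 (t.length : Int) 1),
        (PySem.List.pyGet? (t ++ [c]) i).getD 'C' = (PySem.List.pyGet? t i).getD 'C' := by
      intro i hi
      rw [List.mem_filter, PySem.List.mem_pyRange_one] at hi
      obtain ⟨k, rfl⟩ : ∃ k : Nat, i = (k : Int) := ⟨i.toNat, by omega⟩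
      have hk : k < t.length := by exact_mod_cast hi.1.2
      simp only [PySem.List.pyGet?_natCast]
      rw [List.getElem?_append_left hk]
    rw [List.filter_congr hfil, List.map_congr_left hmap, ih]
    congr 1
    cases t with
    | nil => simp [List.filter_cons, PySem.List.pyGet?, PySem.List.pyIdx?]
    | cons a l =>
      have hlast : PySem.List.pyGet? ((a :: l) ++ [c]) (((a :: l).length : Int) - 1)
          = (a :: l).getLast? := by
        have h1 : (((a :: l).length : Nat) : Int) - 1 = ((l.length : Nat) : Int) := by
          push_cast; simp
        rw [h1, PySem.List.pyGet?_natCast,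
            List.getElem?_append_left (by simp),
            List.getLast?_eq_getElem?]
        simp
      have hget : PySem.List.pyGet? ((a :: l) ++ [c]) ((a :: l).length : Int) = some c := by
        rw [PySem.List.pyGet?_natCast, List.getElem?_append_right (by simp)]
        simp
      have hne : ((((a :: l).length : Nat) : Int) == 0) = false := by
        simp
        omega
      simp only [List.filter_cons, List.filter_nil, hne, Bool.false_or, hlast, hget]
      by_cases h : (a :: l).getLast? = some c
      · simp [h]
      · have hb : (some c != (a :: l).getLast?) = true := by
          simp only [bne_iff_ne]; exact fun hx => h hx.symm
        simp [hb, h, hget]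

theorem main_invariant (cs : List Char) :
    (cs.foldl
        (fun (st : Int × Bool) char =>
          let is_vowel := vovels.contains char
          (if st.2 && !is_vowel then st.1 + 1 else st.1, is_vowel)) (0, false))
      = ((vcCount (collapse (cs.map vcOf)) : Int),
         ((cs.map vcOf).getLast? == some 'V')) := by
  induction cs using List.reverseRecOn with
  | nil => simp [collapse, vcCount]
  | append_singleton t c ih =>
    rw [List.foldl_append, ih]
    simp only [List.foldl_cons, List.foldl_nil, List.map_append, List.map_cons,
      List.map_nil, List.getLast?_concat]
    rw [collapse_append]
    by_cases hl2 : (t.map vcOf).getLast? = some (vcOf c)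
    · rw [if_pos hl2]
      simp only [List.append_nil]
      by_cases hv : vovels.contains c = true
      · have hv' : c ∈ vovels := by simpa using hv
        have hx : vcOf c = 'V' := by simp [vcOf, hv']
        rw [hx] at hl2
        simp [hv', hl2, hx]
      · have hv' : c ∉ vovels := by simpa using hv
        have hx : vcOf c = 'C' := by simp [vcOf, hv']
        rw [hx] at hl2
        have hl : ¬ (t.map vcOf).getLast? = some 'V' := by rw [hl2]; decide
        simp [hv', hl, hl2, hx]
    · rw [if_neg hl2, vcCount_append_singleton, getLast?_collapse]
      by_cases hv : vovels.contains c = true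
      · have hv' : c ∈ vovels := by simpa using hv
        have hx : vcOf c = 'V' := by simp [vcOf, hv']
        rw [hx] at hl2 ⊢
        simp [hv', hx]
      · have hv' : c ∉ vovels := by simpa using hv
        have hx : vcOf c = 'C' := by simp [vcOf, hv']
        rw [hx] at hl2 ⊢
        by_cases hl : (t.map vcOf).getLast? = some 'V'
        · simp [hv', hl, hx]
        · have hc : vovels.contains c = false := by simp [hv']
          rw [if_neg (show ¬(((List.map vcOf t).getLast? == some 'V' && !vovels.contains c) = true) by
                rw [beq_eq_false_iff_ne.mpr hl]; simp),
              if_neg (show ¬((List.map vcOf t).getLast? = some 'V' ∧ ('C' : Char) = 'C') from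
                fun h => hl h.1)]
          simp [hc, hv']

-- ===== VERDICT (by name: the statement is the Claim_ definition above) =====
theorem measure_of_word_spec : Claim_equal_measure_of_word := by
  intro word _
  unfold Spec_measure_of_word measure_of_word measure_of_word_alt
  rw [PySem.List.foldl_append_singleton_eq_map]
  simp only [List.nil_append]
  rw [show (fun c => if vovels.contains c then 'V' else 'C') = vcOf from rfl,
      pyfold_eq_collapse, count_eq_vcCount, main_invariant]
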